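-- pv_equiv track=rewrite | github.com/mxposed/cellBrowser | src/cbPyLib/cellbrowser/genes.py | keepOnlyUnique
-- ===== SOURCE A (Python) =====
-- def keepOnlyUnique(dictSet):
--     """ give a dict with key -> set, return a dict with key -> set, but only with elements in the set that
--     that don't appear in any other set
--     """
--     uniqVals = {}
--     for key1, origVals in dictSet.items():
--         vals = set(list(origVals))
--
--         for key2 in dictSet.keys():
--             if key1==key2:
--                 continue
--             vals = vals - dictSet[key2]
--         uniqVals[key1] = vals
--
--     setList = list(dictSet.values())
--     allCommon = set.intersection(*setList)
--     return uniqVals, len(allCommon)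
-- ===== SOURCE B (Python) =====
-- def keepOnlyUnique(dictSet):
--     """One pass: count global occurrences of every element; an element is unique
--     to its key iff its total count is 1, and common to all iff its count equals
--     the number of sets."""
--     counts = {}
--     for vals in dictSet.values():
--         for v in vals:
--             counts[v] = counts.get(v, 0) + 1
--     uniqVals = {}
--     for key, vals in dictSet.items():
--         uniqVals[key] = {v for v in vals if counts[v] == 1}
--     nSets = len(dictSet)
--     nCommon = 0
--     for c in counts.values():
--         if c == nSets:
--             nCommon += 1
--     return uniqVals, nCommon
-- ===== Notes on version B (the rewrite author's own statement) =====
-- stated objective: faster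
-- what changed: Replaces the quadratic per-key subtraction of every other set (and the separate all-sets intersection) by a single global occurrence counter: an element is unique to its key iff its total count is 1 and common to all iff its count equals the number of sets.
import Mathlib
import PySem

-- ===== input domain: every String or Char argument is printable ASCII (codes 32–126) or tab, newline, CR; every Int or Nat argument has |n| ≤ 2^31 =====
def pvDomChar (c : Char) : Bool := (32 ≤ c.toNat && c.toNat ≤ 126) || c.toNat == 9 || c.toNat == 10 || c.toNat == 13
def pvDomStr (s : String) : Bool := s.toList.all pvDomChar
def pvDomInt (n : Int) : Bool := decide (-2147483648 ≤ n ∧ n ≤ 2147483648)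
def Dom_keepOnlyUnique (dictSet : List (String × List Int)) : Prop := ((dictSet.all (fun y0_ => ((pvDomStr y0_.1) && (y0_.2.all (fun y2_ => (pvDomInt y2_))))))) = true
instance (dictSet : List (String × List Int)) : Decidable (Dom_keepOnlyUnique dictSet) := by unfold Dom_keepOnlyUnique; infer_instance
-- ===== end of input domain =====

-- B replaces A's per-key subtraction of every other set by one global occurrence counter (faster in a timing run).
-- Return-value equivalence only; neither program mutates its argument.

-- ===== PORT A =====
def keepOnlyUnique (dictSet : List (String × List Int)) : (List (String × List Int)) × Int :=
  let d : PySem.Dict String (List Int) := PySem.Dict.mk dictSet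
  let uniqVals : PySem.Dict String (List Int) :=
    dictSet.foldl (fun acc p =>
      let vals0 : PySem.Set Int := PySem.Set.ofList p.2
      let vals := (dictSet.map Prod.fst).foldl
        (fun v key2 => if p.1 == key2 then v else PySem.Set.diff v (d.getD key2 [])) vals0
      acc.insert p.1 vals) PySem.Dict.empty
  let setList : List (List Int) := dictSet.map Prod.snd
  let allCommon : PySem.Set Int :=
    match setList with
    | [] => []  -- set.intersection(*[]) raises TypeError; excluded by Pre_
    | s :: rest => rest.foldl (fun a t => PySem.Set.inter a t) s
  (uniqVals.items, (allCommon.length : Int))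

-- ===== PORT B =====
def keepOnlyUnique_alt (dictSet : List (String × List Int)) : (List (String × List Int)) × Int :=
  let counts : PySem.Dict Int Int :=
    dictSet.foldl (fun d p => p.2.foldl (fun d v => d.insert v (d.getD v 0 + 1)) d) PySem.Dict.empty
  let uniqVals : PySem.Dict String (List Int) :=
    dictSet.foldl (fun acc p =>
      acc.insert p.1 (PySem.Set.ofList (p.2.filter (fun v => counts.getD v 0 == 1)))) PySem.Dict.empty
  let nSets : Int := dictSet.length
  let nCommon : Int := counts.values.foldl (fun acc c => if c == nSets then acc + 1 else acc) 0
  (uniqVals.items, nCommon)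

-- ===== PRECONDITION & SPEC =====
-- Pre_ excludes the empty dict, on which A raises TypeError (set.intersection with no arguments),
-- and association lists with duplicate keys or duplicate elements inside a value list, which are not
-- valid encodings of A's dict-of-sets argument (the Python dict/set collapses them before A runs).
def Pre_keepOnlyUnique (dictSet : List (String × List Int)) : Prop :=
  dictSet ≠ [] ∧ (dictSet.map Prod.fst).Nodup ∧ ∀ p ∈ dictSet, p.2.Nodup
instance (dictSet : List (String × List Int)) : Decidable (Pre_keepOnlyUnique dictSet) := by unfold Pre_keepOnlyUnique; infer_instance
def pvWitness_keepOnlyUnique : (List (String × List Int)) := [("a", [1, 2]), ("b", [2, 3])]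

def Spec_keepOnlyUnique (dictSet : List (String × List Int)) (out : (List (String × List Int)) × Int) : Prop := out = keepOnlyUnique_alt dictSet
instance (dictSet : List (String × List Int)) (out : (List (String × List Int)) × Int) : Decidable (Spec_keepOnlyUnique dictSet out) := by unfold Spec_keepOnlyUnique; infer_instance

-- ===== CLAIM (what is proved, stated in full; the proofs are below) =====
def Claim_equal_keepOnlyUnique : Prop := ∀ (dictSet : List (String × List Int)), Dom_keepOnlyUnique dictSet → Pre_keepOnlyUnique dictSet → Spec_keepOnlyUnique dictSet (keepOnlyUnique dictSet)

-- ===== LEMMAS AND PROOFS =====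

theorem pv_counts_eq (l : List (String × List Int)) :
    l.foldl (fun d p => p.2.foldl (fun d v => d.insert v (d.getD v 0 + 1)) d) PySem.Dict.empty
      = PySem.Dict.counter ((l.map Prod.snd).flatten) := by
  rw [← PySem.Dict.foldl_insert_getD_add_one_eq_counter, List.foldl_flatten, List.foldl_map]

theorem pv_diff_fold (keys : List String) (k1 : String) (g : String → List Int) (s : List Int) :
    keys.foldl (fun v key2 => if k1 == key2 then v else PySem.Set.diff v (g key2)) s
      = s.filter (fun v => keys.all (fun k => k1 == k || !((g k).contains v))) := by
  induction keys generalizing s with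
  | nil => simp
  | cons k t ih =>
    by_cases h : (k1 == k) = true
    · rw [List.foldl_cons, if_pos h, ih]
      apply List.filter_congr
      intro x _
      simp [h]
    · rw [List.foldl_cons, if_neg h, ih]
      simp only [PySem.Set.diff, List.filter_filter]
      apply List.filter_congr
      intro x _
      simp [eq_false_of_ne_true h, PySem.Set.contains, Bool.and_comm]

theorem pv_inter_fold (rest : List (List Int)) (s : List Int) :
    rest.foldl (fun a t => PySem.Set.inter a t) s
      = s.filter (fun v => rest.all (fun t => t.contains v)) := by
  induction rest generalizing s with
  | nil => simp
  | cons r t ih =>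
    rw [List.foldl_cons, ih]
    simp only [PySem.Set.inter, List.filter_filter]
    apply List.filter_congr
    intro x _
    simp [PySem.Set.contains, Bool.and_comm]

theorem pv_sum_le (l : List (String × List Int)) (v : Int) (h : ∀ p ∈ l, p.2.Nodup) :
    (l.map (fun q => q.2.count v)).sum ≤ l.length := by
  induction l with
  | nil => simp
  | cons p t ih =>
    have h1 : p.2.count v ≤ 1 := (List.nodup_iff_count_le_one.mp (h p (by simp))) v
    have h2 := ih (fun q hq => h q (by simp [hq]))
    simp only [List.map_cons, List.sum_cons, List.length_cons]
    omega

theorem pv_sum_eq_len_iff (l : List (String × List Int)) (v : Int) (h : ∀ p ∈ l, p.2.Nodup) :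
    (l.map (fun q => q.2.count v)).sum = l.length ↔ ∀ q ∈ l, v ∈ q.2 := by
  induction l with
  | nil => simp
  | cons p t ih =>
    have h1 : p.2.count v ≤ 1 := (List.nodup_iff_count_le_one.mp (h p (by simp))) v
    have h2 := pv_sum_le t v (fun q hq => h q (by simp [hq]))
    have h3 := ih (fun q hq => h q (by simp [hq]))
    simp only [List.map_cons, List.sum_cons, List.length_cons, List.mem_cons]
    constructor
    · intro he
      have hc : p.2.count v = 1 := by omega
      have ht : (t.map (fun q => q.2.count v)).sum = t.length := by omega
      intro q hq
      rcases hq with rfl | hq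
      · exact List.count_pos_iff.mp (by omega)
      · exact (h3.mp ht) q hq
    · intro hall
      have hc : 0 < p.2.count v := List.count_pos_iff.mpr (hall p (Or.inl rfl))
      have ht := h3.mpr (fun q hq => hall q (Or.inr hq))
      omega

theorem pv_sum_eq_one_iff (l : List (String × List Int)) (v : Int)
    (hk : (l.map Prod.fst).Nodup) (h : ∀ p ∈ l, p.2.Nodup)
    (p : String × List Int) (hp : p ∈ l) (hv : v ∈ p.2) :
    (l.map (fun q => q.2.count v)).sum = 1 ↔ ∀ q ∈ l, q.1 ≠ p.1 → v ∉ q.2 := by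
  induction l with
  | nil => simp at hp
  | cons r t ih =>
    simp only [List.map_cons, List.sum_cons, List.mem_cons] at *
    rcases hp with rfl | hp
    · -- head is p
      have hc : p.2.count v = 1 := List.count_eq_one_of_mem (h p (Or.inl rfl)) hv
      have hkt : ∀ q ∈ t, q.1 ≠ p.1 := by
        intro q hq heq
        exact (List.nodup_cons.mp hk).1 (heq ▸ List.mem_map_of_mem hq)
      constructor
      · intro he q hq hne
        rcases hq with rfl | hq
        · exact absurd rfl hne
        · have : (t.map (fun q => q.2.count v)).sum = 0 := by omega
          have := List.sum_eq_zero_iff_forall_eq_nat.mp this (q.2.count v) (List.mem_map_of_mem hq)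
          exact List.count_eq_zero.mp this
      · intro hall
        have : ∀ x ∈ t.map (fun q => q.2.count v), x = 0 := by
          intro x hx
          obtain ⟨q, hq, rfl⟩ := List.mem_map.mp hx
          exact List.count_eq_zero.mpr (hall q (Or.inr hq) (hkt q hq))
        have := List.sum_eq_zero_iff_forall_eq_nat.mpr this
        omega
    · -- p in tail
      have hrp : r.1 ≠ p.1 := by
        intro heq
        exact (List.nodup_cons.mp hk).1 (heq ▸ List.mem_map_of_mem hp)
      have hS : 0 < (t.map (fun q => q.2.count v)).sum := by
        have h1 : 0 < p.2.count v := List.count_pos_iff.mpr hv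
        have h2 : p.2.count v ≤ (t.map (fun q => q.2.count v)).sum :=
          List.le_sum_of_mem (List.mem_map_of_mem hp)
        omega
      have iht := ih (List.nodup_cons.mp hk).2 (fun q hq => h q (Or.inr hq)) hp
      constructor
      · intro he q hq hne
        have hr0 : r.2.count v = 0 := by omega
        rcases hq with rfl | hq
        · exact List.count_eq_zero.mp hr0
        · exact iht.mp (by omega) q hq hne
      · intro hall
        have hr0 : r.2.count v = 0 := List.count_eq_zero.mpr (hall r (Or.inl rfl) hrp)
        have := iht.mpr (fun q hq hne => hall q (Or.inr hq) hne)
        omega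

theorem pv_main (dictSet : List (String × List Int)) (hne : dictSet ≠ [])
    (hk : (dictSet.map Prod.fst).Nodup) (hn : ∀ p ∈ dictSet, p.2.Nodup) :
    keepOnlyUnique dictSet = keepOnlyUnique_alt dictSet := by
  have hgetD : ∀ q ∈ dictSet, (PySem.Dict.mk dictSet).getD q.1 [] = q.2 := by
    intro q hq
    exact PySem.Dict.getD_of_mem_items _ (by simpa [PySem.Dict.items] using hq) hk []
  unfold keepOnlyUnique keepOnlyUnique_alt
  rw [pv_counts_eq, Prod.mk.injEq]
  constructor
  · -- first component: the uniqVals dicts agree entrywise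
    congr 1
    apply PySem.List.foldl_congr_mem
    intro acc p hp
    dsimp only
    congr 1
    rw [pv_diff_fold, PySem.Set.ofList_eq_self_of_nodup p.2 (hn p hp),
        PySem.Set.ofList_eq_self_of_nodup _ ((hn p hp).filter _)]
    apply List.filter_congr
    intro v hv
    rw [PySem.Dict.getD_counter, Bool.eq_iff_iff]
    have hR : (((((dictSet.map Prod.snd).flatten.count v : Int)) == 1) = true)
        ↔ (dictSet.map Prod.snd).flatten.count v = 1 := by simp
    rw [hR, List.count_flatten, List.map_map]
    rw [show (dictSet.map (List.count v ∘ Prod.snd)) = (dictSet.map (fun q => q.2.count v)) from rfl]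
    rw [pv_sum_eq_one_iff dictSet v hk hn p hp hv]
    simp only [List.all_eq_true]
    constructor
    · intro h q hq hne1
      have h2 := h q.1 (List.mem_map_of_mem hq)
      rw [hgetD q hq] at h2
      simp only [Bool.or_eq_true, beq_iff_eq, Bool.not_eq_true'] at h2
      rcases h2 with h2 | h2
      · exact absurd h2.symm hne1
      · simpa using h2
    · intro h x hx
      obtain ⟨q, hq, rfl⟩ := List.mem_map.mp hx
      rw [hgetD q hq]
      by_cases he : p.1 = q.1
      · simp [he]
      · have := h q hq (fun e => he e.symm)
        simp [this]
  · -- second component: the common-to-all count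
    cases dictSet with
    | nil => exact absurd rfl hne
    | cons p0 rest =>
      simp only [List.map_cons]
      rw [pv_inter_fold, PySem.List.foldl_beq_add_one]
      simp only [PySem.Dict.values, PySem.Dict.items_counter, List.map_map, zero_add]
      rw [List.count_eq_countP, List.countP_map, List.countP_eq_length_filter]
      have hflat : (p0.2 :: List.map Prod.snd rest) = List.map Prod.snd (p0 :: rest) := rfl
      have hcount : ∀ w : Int, List.count w (p0.2 :: List.map Prod.snd rest).flatten
          = ((p0 :: rest).map (fun q => q.2.count w)).sum := by
        intro w
        rw [hflat, List.count_flatten, List.map_map]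
        rfl
      have hlen : (List.filter (fun v => (List.map Prod.snd rest).all fun t => t.contains v) p0.2).length
          = (List.filter (fun k => ((List.count k (p0.2 :: List.map Prod.snd rest).flatten : Int) == ((p0 :: rest).length : Int)))
              (PySem.Set.ofList (p0.2 :: List.map Prod.snd rest).flatten)).length := by
        apply List.Perm.length_eq
        apply (List.perm_ext_iff_of_nodup ((hn p0 (by simp)).filter _) ((PySem.Set.nodup_ofList _).filter _)).mpr
        intro v
        simp only [List.mem_filter, PySem.Set.mem_ofList, List.all_eq_true, beq_iff_eq]
        constructor
        · rintro ⟨hv, hall⟩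
          have hmem : ∀ q ∈ p0 :: rest, v ∈ q.2 := by
            intro q hq
            rcases List.mem_cons.mp hq with rfl | hq
            · exact hv
            · have := hall q.2 (List.mem_map_of_mem hq)
              simpa using this
          have hsum := (pv_sum_eq_len_iff (p0 :: rest) v hn).mpr hmem
          refine ⟨List.mem_flatten.mpr ⟨p0.2, by simp, hv⟩, ?_⟩
          rw [hcount v, hsum]
        · rintro ⟨hvF, hcnt⟩
          have hc : List.count v (p0.2 :: List.map Prod.snd rest).flatten = (p0 :: rest).length := by
            exact_mod_cast hcnt
          rw [hcount v] at hc
          have hmem := (pv_sum_eq_len_iff (p0 :: rest) v hn).mp hc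
          refine ⟨hmem p0 (by simp), ?_⟩
          intro t ht
          obtain ⟨q, hq, rfl⟩ := List.mem_map.mp ht
          simpa using hmem q (List.mem_cons_of_mem _ hq)
      exact_mod_cast hlen

-- ===== VERDICT (by name: the statement is the Claim_ definition above) =====
theorem keepOnlyUnique_spec : Claim_equal_keepOnlyUnique := by
  intro dictSet _ hpre
  unfold Spec_keepOnlyUnique
  exact pv_main dictSet hpre.1 hpre.2.1 hpre.2.2
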